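-- pv_equiv track=rewrite | github.com/harshal-509/Competitive-Programming | Leetcode Weekly Contest 252/Maximum Number of Weeks for Which You Can Work.py | numberOfWeeks
-- ===== SOURCE A (Python) =====
-- from typing import List
--
-- def numberOfWeeks(milestones: List[int]) -> int:
--     milestones=sorted(milestones,reverse=True)
--     ans=0
--     n=len(milestones)
--     if(n==1):
--         return 1
--     arr=[0 for i in range(n)]
--     arr[-1]=milestones[-1]
--     for i in range(n-2,-1,-1):
--         arr[i]=arr[i+1]+milestones[i]
--     for i in range(n-1):
--         ans+=min(milestones[i],arr[i+1]+1)
--     return min(milestones[0],arr[1]+1)+arr[1]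
-- ===== SOURCE B (Python) =====
-- def numberOfWeeks(milestones):
--     m, rest = milestones[0], 0
--     for x in milestones[1:]:
--         if x > m:
--             rest += m
--             m = x
--         else:
--             rest += x
--     return rest + rest + 1 if m > rest + 1 else m + rest
-- ===== Notes on version B (the rewrite author's own statement) =====
-- stated objective: faster
-- what changed: B replaces A's sort + suffix-sum array + accumulation loops by a single left-to-right pass carrying a running (leader, rest) pair (when a bigger milestone appears the old leader is demoted into rest), finishing with a branch: 2*rest+1 if the leader dominates, else the grand total.
-- intended difference: On one-element lists whose single entry is < 1, A returns the hard-coded 1 while B returns the entry itself; for a milestone count of 0 (or negative) no full week can be worked, so B's value is the intended one. — e.g. on numberOfWeeks([0]): A returns 1, B returns 0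
import Mathlib
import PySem

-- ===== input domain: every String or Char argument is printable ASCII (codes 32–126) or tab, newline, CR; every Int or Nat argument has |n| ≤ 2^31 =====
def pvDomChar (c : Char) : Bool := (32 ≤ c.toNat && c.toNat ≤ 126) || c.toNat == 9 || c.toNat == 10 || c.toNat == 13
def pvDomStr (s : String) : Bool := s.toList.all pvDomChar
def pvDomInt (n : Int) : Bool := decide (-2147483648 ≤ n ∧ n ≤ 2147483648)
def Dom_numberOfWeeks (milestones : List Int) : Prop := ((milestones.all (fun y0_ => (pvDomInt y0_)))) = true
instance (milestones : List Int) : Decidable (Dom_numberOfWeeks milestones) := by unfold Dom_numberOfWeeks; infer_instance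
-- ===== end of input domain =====

-- B replaces A's sort + suffix-sum array by one left-to-right pass carrying a running
-- (leader, rest) pair, then a final branch (objective: faster, O(n) vs O(n log n)).

-- ===== PORT A =====
def numberOfWeeks (milestones : List Int) : Int :=
  let ms := PySem.List.sorted milestones (fun x => x) true
  let n : Nat := ms.length
  if n == 1 then 1
  else
    let arr : List Int := (PySem.List.pyRange 0 (n : Int) 1).map (fun _ => 0)
    -- arr[-1] = milestones[-1]  (index -1 resolves to position n-1; n ≥ 1 under Pre_)
    let arr := PySem.List.pySetD arr ((n : Int) - 1) (PySem.List.pyGetD ms (-1) 0)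
    -- for i in range(n-2, -1, -1): arr[i] = arr[i+1] + milestones[i]
    let arr := (PySem.List.pyRange ((n : Int) - 2) (-1) (-1)).foldl
      (fun a i => PySem.List.pySetD a i (PySem.List.pyGetD a (i + 1) 0 + PySem.List.pyGetD ms i 0)) arr
    -- for i in range(n-1): ans += min(milestones[i], arr[i+1]+1)   (ans is never returned)
    let _ans := (PySem.List.pyRange 0 ((n : Int) - 1) 1).foldl
      (fun acc i => acc + min (PySem.List.pyGetD ms i 0) (PySem.List.pyGetD arr (i + 1) 0 + 1)) 0
    min (PySem.List.pyGetD ms 0 0) (PySem.List.pyGetD arr 1 0 + 1) + PySem.List.pyGetD arr 1 0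

-- ===== PORT B =====
-- m, rest = milestones[0], 0; for x in milestones[1:]: demote the leader into rest
-- when x beats it, otherwise absorb x into rest; final branch on leader dominance.
def numberOfWeeks_alt (milestones : List Int) : Int :=
  let m0 := PySem.List.pyGetD milestones 0 0   -- milestones[0]; raises on [] (outside Pre_)
  let p := (PySem.List.slice milestones (some 1) none).foldl
    (fun mr x => if x > mr.1 then (x, mr.2 + mr.1) else (mr.1, mr.2 + x)) (m0, 0)
  if p.1 > p.2 + 1 then p.2 + p.2 + 1 else p.1 + p.2

-- ===== PRECONDITION & SPEC =====
-- Pre_ excludes the empty list, on which A raises IndexError (arr[-1]) and B's milestones[0] raises IndexError.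
def Pre_numberOfWeeks (milestones : List Int) : Prop := milestones ≠ []
instance (milestones : List Int) : Decidable (Pre_numberOfWeeks milestones) := by unfold Pre_numberOfWeeks; infer_instance
def pvWitness_numberOfWeeks : List Int := [3, 2, 1]

-- On one-element lists whose single entry is < 1, A returns the hard-coded 1 while B returns
-- the entry itself; for a milestone count of 0 (or negative) no full week can be worked,
-- so B's value is the intended one.
def D_numberOfWeeks (milestones : List Int) : Prop :=
  milestones.length = 1 ∧ milestones.headD 0 < 1
instance (milestones : List Int) : Decidable (D_numberOfWeeks milestones) := by unfold D_numberOfWeeks; infer_instance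

def Spec_numberOfWeeks (milestones : List Int) (out : Int) : Prop :=
  ¬ D_numberOfWeeks milestones → out = numberOfWeeks_alt milestones
instance (milestones : List Int) (out : Int) : Decidable (Spec_numberOfWeeks milestones out) := by unfold Spec_numberOfWeeks; infer_instance

def pvDiffWitness_numberOfWeeks : List Int := [0]
def pvDiffWitnessOut_numberOfWeeks : Int × Int := (1, 0)

-- ===== CLAIM (what is proved, stated in full; the proofs are below) =====
def Claim_unchanged_numberOfWeeks : Prop := ∀ (milestones : List Int), Dom_numberOfWeeks milestones → Pre_numberOfWeeks milestones → Spec_numberOfWeeks milestones (numberOfWeeks milestones)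
def Claim_changed_numberOfWeeks : Prop := Dom_numberOfWeeks (pvDiffWitness_numberOfWeeks) ∧ Pre_numberOfWeeks (pvDiffWitness_numberOfWeeks) ∧ D_numberOfWeeks (pvDiffWitness_numberOfWeeks) ∧ numberOfWeeks (pvDiffWitness_numberOfWeeks) = pvDiffWitnessOut_numberOfWeeks.1 ∧ numberOfWeeks_alt (pvDiffWitness_numberOfWeeks) = pvDiffWitnessOut_numberOfWeeks.2 ∧ pvDiffWitnessOut_numberOfWeeks.1 ≠ pvDiffWitnessOut_numberOfWeeks.2
def Claim_exact_numberOfWeeks : Prop := ∀ (milestones : List Int), Dom_numberOfWeeks milestones → Pre_numberOfWeeks milestones → D_numberOfWeeks milestones → numberOfWeeks milestones ≠ numberOfWeeks_alt milestones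

-- ===== LEMMAS AND PROOFS =====

theorem drop_sum_step (s : List Int) (i : Nat) (hi : i < s.length) :
    (s.drop i).sum = s.getD i 0 + (s.drop (i+1)).sum := by
  rw [List.drop_eq_getElem_cons hi, List.sum_cons, List.getD_eq_getElem s 0 hi]

theorem fill_spec (s : List Int) (k : Nat) (arr : List Int)
    (hlen : arr.length = s.length) (hk : k + 1 < s.length)
    (hsuf : ∀ j : Nat, k < j → j < s.length → arr.getD j 0 = (s.drop j).sum) :
    ((PySem.List.pyRange (k : Int) (-1) (-1)).foldl
        (fun a i => PySem.List.pySetD a i (PySem.List.pyGetD a (i + 1) 0 + PySem.List.pyGetD s i 0)) arr).length = s.length ∧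
    ∀ j : Nat, j < s.length →
      ((PySem.List.pyRange (k : Int) (-1) (-1)).foldl
        (fun a i => PySem.List.pySetD a i (PySem.List.pyGetD a (i + 1) 0 + PySem.List.pyGetD s i 0)) arr).getD j 0 = (s.drop j).sum := by
  induction k generalizing arr with
  | zero =>
    rw [show ((0:Nat):Int) = 0 by norm_num, PySem.List.pyRange_neg_one_cons (by omega),
        PySem.List.pyRange_neg_one_eq_nil (by omega)]
    simp only [List.foldl_cons, List.foldl_nil]
    have h1 : PySem.List.pyGetD arr (0 + 1) 0 = arr.getD 1 0 := by
      simpa using PySem.List.pyGetD_natCast arr 1 0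
    have hset : PySem.List.pySetD arr (0:Int) (PySem.List.pyGetD arr (0+1) 0 + PySem.List.pyGetD s 0 0)
        = arr.set 0 (arr.getD 1 0 + s.getD 0 0) := by
      rw [h1]
      have h2 : PySem.List.pyGetD s (0:Int) 0 = s.getD 0 0 := by
        simpa using PySem.List.pyGetD_natCast s 0 0
      rw [h2]
      simpa using PySem.List.pySetD_natCast arr 0 (arr.getD 1 0 + s.getD 0 0)
    rw [hset]
    constructor
    · simpa using hlen
    · intro j hj
      by_cases hj0 : j = 0
      · subst hj0
        rw [List.getD_eq_getElem _ 0 (by rw [List.length_set, hlen]; omega), List.getElem_set_self (by simp [hlen]; omega)]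
        rw [drop_sum_step s 0 (by omega), hsuf 1 (by omega) hk]
        ring
      · rw [List.getD_eq_getElem _ 0 (by rw [List.length_set, hlen]; omega), List.getElem_set]
        rw [if_neg (by omega), ← List.getD_eq_getElem arr 0 (by omega)]
        exact hsuf j (by omega) hj
  | succ k ih =>
    rw [show ((k+1:Nat):Int) = (k:Int)+1 by push_cast; ring, PySem.List.pyRange_neg_one_cons (by omega)]
    simp only [List.foldl_cons]
    rw [show (k:Int) + 1 - 1 = (k:Int) by ring]
    set v := PySem.List.pyGetD arr ((k:Int) + 1 + 1) 0 + PySem.List.pyGetD s ((k:Int)+1) 0 with hv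
    have hset : PySem.List.pySetD arr ((k:Int)+1) v = arr.set (k+1) v := by
      have := PySem.List.pySetD_natCast arr (k+1) v
      push_cast at this
      exact this
    rw [hset]
    apply ih
    · simp [hlen]
    · omega
    · intro j hjk hjs
      by_cases hje : j = k + 1
      · subst hje
        rw [List.getD_eq_getElem _ 0 (by rw [List.length_set, hlen]; omega), List.getElem_set_self (by simp [hlen]; omega)]
        rw [hv]
        have hget : PySem.List.pyGetD s ((k:Int)+1) 0 = s.getD (k+1) 0 := by
          have := PySem.List.pyGetD_natCast s (k+1) 0
          push_cast at this; exact this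
        have hget2 : PySem.List.pyGetD arr ((k:Int)+2) 0 = arr.getD (k+2) 0 := by
          have := PySem.List.pyGetD_natCast arr (k+2) 0
          push_cast at this
          exact this
        rw [hget, show ((k:Int)+1+1) = (k:Int)+2 by ring, hget2]
        have hdrop2 : arr.getD (k+2) 0 = (s.drop (k+2)).sum := by
          by_cases h2 : k + 2 < s.length
          · exact hsuf (k+2) (by omega) h2
          · rw [List.getD_eq_default _ _ (by omega), List.drop_eq_nil_of_le (by omega)]
            simp
        rw [hdrop2, drop_sum_step s (k+1) (by omega)]
        ring
      · rw [List.getD_eq_getElem _ 0 (by rw [List.length_set, hlen]; omega), List.getElem_set]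
        rw [if_neg (by omega), ← List.getD_eq_getElem arr 0 (by omega)]
        exact hsuf j (by omega) hjs

theorem A_eval_long (ms : List Int) (h : Int) (t : List Int)
    (hs : PySem.List.sorted ms (fun x => x) true = h :: t) (ht : t ≠ []) :
    numberOfWeeks ms = min h (t.sum + 1) + t.sum := by
  have hlen2 : 2 ≤ (h :: t).length := by
    cases t with
    | nil => exact absurd rfl ht
    | cons a u => simp
  simp only [numberOfWeeks, hs]
  rw [if_neg (by simp; omega)]
  set n : Nat := (h :: t).length with hn
  clear_value n
  set arr0 : List Int := (PySem.List.pyRange 0 (n : Int) 1).map (fun _ => 0) with harr0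
  have hlen0 : arr0.length = n := by simp [harr0, PySem.List.length_pyRange_one]
  have hget0 : ∀ j : Nat, arr0.getD j 0 = 0 := by
    intro j
    by_cases hj : j < arr0.length
    · rw [List.getD_eq_getElem _ 0 hj]; simp [harr0]
    · rw [List.getD_eq_default _ _ (by omega)]
  set v := PySem.List.pyGetD (h :: t) (-1) 0 with hv
  have hvval : v = (h :: t).getLast (by simp) := PySem.List.pyGetD_neg_one (xs := h :: t) (d := 0) (by simp)
  have hset1 : PySem.List.pySetD arr0 ((n : Int) - 1) v = arr0.set (n - 1) v := by
    have := PySem.List.pySetD_natCast arr0 (n - 1) v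
    rw [show (((n-1 : Nat)) : Int) = (n : Int) - 1 by rw [Nat.cast_sub (by omega)]; norm_num] at this
    exact this
  rw [hset1]
  set arr1 := arr0.set (n - 1) v with harr1
  have hlen1 : arr1.length = (h :: t).length := by rw [harr1, List.length_set, hlen0, hn]
  have hsuf1 : ∀ j : Nat, n - 2 < j → j < (h :: t).length → arr1.getD j 0 = ((h :: t).drop j).sum := by
    intro j hj1 hj2
    have hj : j = n - 1 := by omega
    subst hj
    rw [harr1, List.getD_eq_getElem _ 0 (by simp [hlen0]; omega), List.getElem_set_self (by simp [hlen0]; omega)]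
    rw [hvval]
    rw [show n - 1 = (h :: t).length - 1 by rw [hn], List.drop_length_sub_one (by simp)]
    simp
  have hfill := fill_spec (h :: t) (n - 2) arr1 hlen1 (by omega) hsuf1
  rw [show (n : Int) - 2 = ((n - 2 : Nat) : Int) by rw [Nat.cast_sub (by omega)]; norm_num]
  have harrget : ((PySem.List.pyRange ((n - 2 : Nat) : Int) (-1) (-1)).foldl
      (fun a i => PySem.List.pySetD a i (PySem.List.pyGetD a (i + 1) 0 + PySem.List.pyGetD (h :: t) i 0)) arr1).getD 1 0
      = t.sum := by
    rw [hfill.2 1 (by omega)]; simp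
  set arr2 := (PySem.List.pyRange ((n - 2 : Nat) : Int) (-1) (-1)).foldl
      (fun a i => PySem.List.pySetD a i (PySem.List.pyGetD a (i + 1) 0 + PySem.List.pyGetD (h :: t) i 0)) arr1 with harr2
  have h1 : PySem.List.pyGetD arr2 1 0 = t.sum := by
    have := PySem.List.pyGetD_natCast arr2 1 0
    rw [show ((1:Nat):Int) = 1 by norm_num] at this
    rw [this]; exact harrget
  have h0 : PySem.List.pyGetD (h :: t) 0 0 = h := PySem.List.pyGetD_zero_cons h t 0
  rw [h1, h0]

-- B's fold invariant: after folding l from (m, rest), the first component is the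
-- maximum of m :: l (a member and an upper bound) and the second is everything else.
theorem B_fold_inv (l : List Int) (m rest : Int) :
    (l.foldl (fun mr x => if x > mr.1 then (x, mr.2 + mr.1) else (mr.1, mr.2 + x)) (m, rest)).1 ∈ m :: l ∧
    (∀ y ∈ m :: l, y ≤ (l.foldl (fun mr x => if x > mr.1 then (x, mr.2 + mr.1) else (mr.1, mr.2 + x)) (m, rest)).1) ∧
    (l.foldl (fun mr x => if x > mr.1 then (x, mr.2 + mr.1) else (mr.1, mr.2 + x)) (m, rest)).2
      = rest + m + l.sum - (l.foldl (fun mr x => if x > mr.1 then (x, mr.2 + mr.1) else (mr.1, mr.2 + x)) (m, rest)).1 := by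
  induction l generalizing m rest with
  | nil => refine ⟨by simp, by simp, by simp⟩
  | cons x l ih =>
    simp only [List.foldl_cons]
    by_cases hx : x > m
    · rw [if_pos hx]
      obtain ⟨hmem, hub, hsum⟩ := ih x (rest + m)
      refine ⟨?_, ?_, ?_⟩
      · rcases List.mem_cons.mp hmem with h | h
        · rw [h]; exact List.mem_cons_of_mem _ List.mem_cons_self
        · exact List.mem_cons_of_mem _ (List.mem_cons_of_mem _ h)
      · intro y hy
        rcases List.mem_cons.mp hy with h | h
        · rw [h]; exact le_trans (le_of_lt hx) (hub x List.mem_cons_self)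
        · exact hub y h
      · rw [hsum]; simp [List.sum_cons]; ring
    · rw [if_neg hx]
      obtain ⟨hmem, hub, hsum⟩ := ih m (rest + x)
      refine ⟨?_, ?_, ?_⟩
      · rcases List.mem_cons.mp hmem with h | h
        · rw [h]; exact List.mem_cons_self
        · exact List.mem_cons_of_mem _ (List.mem_cons_of_mem _ h)
      · intro y hy
        rcases List.mem_cons.mp hy with h | h
        · rw [h]; exact hub m List.mem_cons_self
        · rcases List.mem_cons.mp h with h' | h'
          · rw [h']; exact le_trans (le_of_not_gt hx) (hub m List.mem_cons_self)
          · exact hub y (List.mem_cons_of_mem _ h')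
      · rw [hsum]; simp [List.sum_cons]; ring

-- B on a nonempty list equals the closed form in terms of the true maximum M of ms.
theorem B_eval (ms : List Int) (hne : ms ≠ []) (M : Int)
    (hMmem : M ∈ ms) (hMub : ∀ y ∈ ms, y ≤ M) :
    numberOfWeeks_alt ms = min M (ms.sum - M + 1) + (ms.sum - M) := by
  obtain ⟨h, t, rfl⟩ : ∃ h t, ms = h :: t := by
    cases ms with
    | nil => exact absurd rfl hne
    | cons h t => exact ⟨h, t, rfl⟩
  simp only [numberOfWeeks_alt, PySem.List.slice_from_one, List.tail_cons,
    PySem.List.pyGetD_zero_cons]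
  obtain ⟨hmem, hub, hsum⟩ := B_fold_inv t h 0
  set r := t.foldl (fun mr x => if x > mr.1 then (x, mr.2 + mr.1) else (mr.1, mr.2 + x)) (h, 0) with hr
  have hrM : r.1 = M := le_antisymm (hMub r.1 hmem) (hub M hMmem)
  have hr2 : r.2 = (h :: t).sum - M := by rw [hsum, hrM]; simp [List.sum_cons]; try ring
  rw [hrM] at hsum ⊢
  rw [hr2]
  by_cases hc : M > (h :: t).sum - M + 1
  · rw [if_pos hc, min_eq_right (by omega)]; ring
  · rw [if_neg hc, min_eq_left (by omega)]

theorem sorted_head_max (ms : List Int) (h : Int) (t : List Int)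
    (hs : PySem.List.sorted ms (fun x => x) true = h :: t) :
    h ∈ ms ∧ ∀ y ∈ ms, y ≤ h := by
  have hperm : (h :: t).Perm ms := hs ▸ PySem.List.sorted_perm ms (fun x => x) true
  exact ⟨hperm.mem_iff.mp List.mem_cons_self,
    PySem.List.key_head_sorted_rev_ge ms (fun x => x) hs⟩

-- ===== VERDICT (by name: the statements are the Claim_ definitions above) =====
theorem numberOfWeeks_spec : Claim_unchanged_numberOfWeeks := by
  intro ms hdom hpre
  unfold Spec_numberOfWeeks
  intro hnd
  cases hs : PySem.List.sorted ms (fun x => x) true with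
  | nil => exact absurd ((PySem.List.sorted_eq_nil_iff _ _ _).mp hs) hpre
  | cons h t =>
    have hperm : (h :: t).Perm ms := hs ▸ PySem.List.sorted_perm ms (fun x => x) true
    have hsum : ms.sum = h + t.sum := by rw [← hperm.sum_eq]; simp
    obtain ⟨hmem, hub⟩ := sorted_head_max ms h t hs
    have hB := B_eval ms hpre h hmem hub
    cases t with
    | nil =>
      have hms : ms = [h] := (List.singleton_perm.mp hperm).symm
      have hh : 1 ≤ h := by
        by_contra hlt
        exact hnd ⟨by rw [hms]; rfl, by rw [hms]; simpa using by omega⟩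
      have hA : numberOfWeeks ms = 1 := by
        simp [numberOfWeeks, hs]
      rw [hA, hB, hsum]
      simp [min_eq_right hh]
    | cons a u =>
      rw [A_eval_long ms h (a :: u) hs (by simp), hB, hsum]
      ring_nf

theorem numberOfWeeks_tight : Claim_exact_numberOfWeeks := by
  intro ms hdom hpre hd
  obtain ⟨hlen, hhd⟩ := hd
  obtain ⟨x, hx⟩ : ∃ x, ms = [x] := by
    cases ms with
    | nil => simp at hlen
    | cons y ys => cases ys with
      | nil => exact ⟨y, rfl⟩
      | cons z zs => simp at hlen
  subst hx
  have hxlt : x < 1 := by simpa using hhd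
  have hsx : PySem.List.sorted [x] (fun y => y) true = [x] :=
    PySem.List.sorted_rev_eq_self_of_pairwise [x] (fun y => y) (by simp)
  have hA : numberOfWeeks [x] = 1 := by simp [numberOfWeeks, hsx]
  have hB : numberOfWeeks_alt [x] = x := by
    have := B_eval [x] (by simp) x (by simp) (by simp)
    rw [this]
    simp [min_eq_left (by omega : x ≤ 1)]
  rw [hA, hB]; omega

theorem numberOfWeeks_changed : Claim_changed_numberOfWeeks := by
  unfold Claim_changed_numberOfWeeks; decide
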